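-- pv_equiv track=rewrite | github.com/tdude92/ez-pic-basic | compiler.py | led_ptp
-- ===== SOURCE A (Python) =====
-- def led_ptp(ports):
--     """Takes a list of lists of 2 ports (that represent 1 led in the form [b/d port, c port]) and returns one subframes worth of port statements."""
--     output = []
--
--     for c in ["c4", "c5", "c6", "c7"]:
--         b_ports = ["0", "0", "0", "0", "0", "0", "0", "0"]
--         c_ports = ["0", "0", "0", "0", "0", "0", "0", "0"]
--         d_ports = ["0", "0", "0", "0", "0", "0", "0", "0"]
--         for port in ports:
--             if port[1] == c:
--                 if port[0][0] == "b":
--                     b_ports[int(port[0][1])] = "1"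
--                 elif port[0][0] == "d":
--                     d_ports[int(port[0][1])] = "1"
--         c_ports[int(c[1])] = "1"
--
--
--         b_ports.reverse()
--         c_ports.reverse()
--         d_ports.reverse()
--
--         b_ports = "".join(b_ports)
--         c_ports = "".join(c_ports)
--         d_ports = "".join(d_ports)
--
--         portb = "portb=%" + b_ports
--         portc = "portc=%" + c_ports
--         portd = "portd=%" + d_ports
--
--         if b_ports + d_ports == "00000000" * 2:
--             output.append("pause 1")
--         else:
--             output.extend([portb + "\n" + portc + "\n" + portd, "pause 1"])
--     return output
-- ===== SOURCE B (Python) =====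
-- def led_ptp(ports):
--     """One grouping pass over ports -> dict c -> set of lit (kind,index) bits, then render the four subframes from lookups."""
--     groups = {}
--     for p in ports:
--         c = p[1]
--         if c in ("c4", "c5", "c6", "c7") and p[0][0] in "bd":
--             groups.setdefault(c, set()).add((p[0][0], int(p[0][1])))
--     output = []
--     for ci, c in enumerate(("c4", "c5", "c6", "c7")):
--         lit = groups.get(c, set())
--         if not lit:
--             output.append("pause 1")
--         else:
--             bbits = "".join("1" if ("b", 7 - j) in lit else "0" for j in range(8))
--             dbits = "".join("1" if ("d", 7 - j) in lit else "0" for j in range(8))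
--             cbits = "".join("1" if 7 - j == ci + 4 else "0" for j in range(8))
--             output.append("portb=%" + bbits + "\nportc=%" + cbits + "\nportd=%" + dbits)
--             output.append("pause 1")
--     return output
-- ===== Notes on version B (the rewrite author's own statement) =====
-- stated objective: alternative
-- what changed: B replaces A's four full scans of ports (one per c-value, each mutating three 8-slot bit lists) by a single grouping pass that builds a dict c -> set of lit (b/d, index) bits, then renders each of the four subframes from one dict lookup; the pause decision becomes an emptiness test on the group instead of a 16-character string comparison.
import Mathlib
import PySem

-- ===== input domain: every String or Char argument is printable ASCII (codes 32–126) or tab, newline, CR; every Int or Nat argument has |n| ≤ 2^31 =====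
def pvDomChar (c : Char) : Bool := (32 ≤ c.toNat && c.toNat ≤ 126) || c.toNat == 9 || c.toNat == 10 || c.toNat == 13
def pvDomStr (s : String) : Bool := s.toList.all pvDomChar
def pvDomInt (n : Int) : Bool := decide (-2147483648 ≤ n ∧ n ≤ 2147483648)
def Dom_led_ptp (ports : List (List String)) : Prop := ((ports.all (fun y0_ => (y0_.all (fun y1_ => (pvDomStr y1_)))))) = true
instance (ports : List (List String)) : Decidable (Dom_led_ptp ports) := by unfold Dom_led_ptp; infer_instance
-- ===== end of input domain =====

-- B replaces A's four full scans of ports by a single grouping pass (dict c-value -> set of lit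
-- (b/d, index) bits) plus one lookup per subframe; equivalence is over the return value only.

-- ===== PORT A =====
-- int(<one-character string>) ported on the character; Pre_ keeps it a digit, so the 0 default is never taken
def pvDigitInt (ch : Char) : Int := (PySem.Int.ofChars? [ch]).getD 0

-- the body of A's inner `for port in ports` loop, for the current c
def pvAStep (c : String) (bd : List String × List String) (port : List String) : List String × List String :=
  if PySem.List.pyGetD port 1 "" = c then
    let p0 := (PySem.List.pyGetD port 0 "").toList
    if PySem.List.pyGetD p0 0 ' ' = 'b' then
      (PySem.List.pySetD bd.1 (pvDigitInt (PySem.List.pyGetD p0 1 ' ')) "1", bd.2)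
    else if PySem.List.pyGetD p0 0 ' ' = 'd' then
      (bd.1, PySem.List.pySetD bd.2 (pvDigitInt (PySem.List.pyGetD p0 1 ' ')) "1")
    else bd
  else bd

def pvZeros : List String := ["0", "0", "0", "0", "0", "0", "0", "0"]

-- one iteration of A's outer loop; `"".join` and str `+` are ported on code-point lists (exact),
-- the final strings are assembled with String.ofList
def pvAFrame (ports : List (List String)) (c : String) : List String :=
  let bd := ports.foldl (pvAStep c) (pvZeros, pvZeros)
  let cp := PySem.List.pySetD pvZeros (pvDigitInt (PySem.List.pyGetD c.toList 1 ' ')) "1"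
  let bs := (bd.1.reverse.map String.toList).flatten
  let cs := (cp.reverse.map String.toList).flatten
  let ds := (bd.2.reverse.map String.toList).flatten
  if bs ++ ds = "0000000000000000".toList then ["pause 1"]
  else [String.ofList ("portb=%".toList ++ bs ++ '\n' :: "portc=%".toList ++ cs ++ '\n' :: "portd=%".toList ++ ds),
        "pause 1"]

def led_ptp (ports : List (List String)) : List String :=
  (["c4", "c5", "c6", "c7"] : List String).foldl (fun out c => out ++ pvAFrame ports c) []

-- ===== PORT B =====
-- B's grouping pass: dict c-value -> set of lit (kind, index) bits; `p[0][0] in "bd"` on a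
-- one-character string is exactly this two-way comparison
def pvBStep (g : PySem.Dict String (PySem.Set (String × Int))) (p : List String)
    : PySem.Dict String (PySem.Set (String × Int)) :=
  let c := PySem.List.pyGetD p 1 ""
  let ch := PySem.List.pyGetD (PySem.List.pyGetD p 0 "").toList 0 ' '
  if (["c4", "c5", "c6", "c7"] : List String).contains c && (ch = 'b' || ch = 'd') then
    g.insert c ((g.getD c PySem.Set.empty).add
      (String.ofList [ch], pvDigitInt (PySem.List.pyGetD (PySem.List.pyGetD p 0 "").toList 1 ' ')))
  else g

def pvBit (S : PySem.Set (String × Int)) (kind : String) (j : Int) : Char :=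
  if PySem.Set.contains S (kind, j) then '1' else '0'

-- one subframe rendered from the group of c (ci = enumerate index)
def pvBFrame (ci : Int) (c : String) (g : PySem.Dict String (PySem.Set (String × Int))) : List String :=
  let lit := g.getD c PySem.Set.empty
  if lit.isEmpty then ["pause 1"]
  else
    let bbits := (PySem.List.pyRange 0 8 1).map (fun j => pvBit lit "b" (7 - j))
    let dbits := (PySem.List.pyRange 0 8 1).map (fun j => pvBit lit "d" (7 - j))
    let cbits := (PySem.List.pyRange 0 8 1).map (fun j => if 7 - j = ci + 4 then '1' else '0')
    [String.ofList ("portb=%".toList ++ bbits ++ '\n' :: "portc=%".toList ++ cbits ++ '\n' :: "portd=%".toList ++ dbits),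
     "pause 1"]

def led_ptp_alt (ports : List (List String)) : List String :=
  let g := ports.foldl pvBStep PySem.Dict.empty
  (PySem.List.enumerate (["c4", "c5", "c6", "c7"] : List String)).foldl
    (fun out ic => out ++ pvBFrame ic.1 ic.2 g) []

-- ===== PRECONDITION & SPEC =====
-- Pre_ excludes exactly the inputs on which the Python A raises: a port list shorter than 2
-- (IndexError on port[1]), and — for ports whose c-value is one of c4..c7 — an empty port[0]
-- (IndexError), or a b/d port whose name lacks a second character (IndexError), whose second
-- character is not a digit (ValueError), or is the digit 8 or 9 (IndexError on the 8-slot lists).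
def PrePort_led_ptp (p : List String) : Prop :=
  2 ≤ p.length ∧
  (p.getD 1 "" ∈ (["c4", "c5", "c6", "c7"] : List String) →
    (p.getD 0 "").toList ≠ [] ∧
    ((p.getD 0 "").toList.getD 0 ' ' = 'b' ∨ (p.getD 0 "").toList.getD 0 ' ' = 'd' →
      2 ≤ (p.getD 0 "").toList.length ∧
      (p.getD 0 "").toList.getD 1 ' ' ∈ (['0', '1', '2', '3', '4', '5', '6', '7'] : List Char)))

def Pre_led_ptp (ports : List (List String)) : Prop := ∀ p ∈ ports, PrePort_led_ptp p
instance (ports : List (List String)) : Decidable (Pre_led_ptp ports) := by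
  unfold Pre_led_ptp
  haveI : DecidablePred PrePort_led_ptp := fun p => by unfold PrePort_led_ptp; infer_instance
  infer_instance

def pvWitness_led_ptp : List (List String) := [["b0", "c4"], ["d7", "c6"], ["led", "c9"]]

def Spec_led_ptp (ports : List (List String)) (out : List String) : Prop := out = led_ptp_alt ports
instance (ports : List (List String)) (out : List String) : Decidable (Spec_led_ptp ports out) := by unfold Spec_led_ptp; infer_instance

-- ===== CLAIM (what is proved, stated in full; the proofs are below) =====
def Claim_equal_led_ptp : Prop := ∀ (ports : List (List String)), Dom_led_ptp ports → Pre_led_ptp ports → Spec_led_ptp ports (led_ptp ports)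

-- ===== LEMMAS AND PROOFS =====

-- A's per-c bit lists, characterised as a function of B's group S
def pvBitS (S : PySem.Set (String × Int)) (kind : String) (j : Int) : String :=
  if PySem.Set.contains S (kind, j) then "1" else "0"

def pvRender (kind : String) (S : PySem.Set (String × Int)) : List String :=
  [pvBitS S kind 0, pvBitS S kind 1, pvBitS S kind 2, pvBitS S kind 3,
   pvBitS S kind 4, pvBitS S kind 5, pvBitS S kind 6, pvBitS S kind 7]

def pvShape (x : String × Int) : Prop :=
  (x.1 = "b" ∨ x.1 = "d") ∧ x.2 ∈ ([0, 1, 2, 3, 4, 5, 6, 7] : List Int)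

lemma pv_digit_mem (ch : Char) (h : ch ∈ (['0','1','2','3','4','5','6','7'] : List Char)) :
    pvDigitInt ch ∈ ([0, 1, 2, 3, 4, 5, 6, 7] : List Int) := by
  simp only [List.mem_cons, List.not_mem_nil, or_false] at h
  rcases h with h|h|h|h|h|h|h|h <;> subst h <;> decide

lemma pv_render_set (S : PySem.Set (String × Int)) (kind : String) (k : Int)
    (hk : k ∈ ([0, 1, 2, 3, 4, 5, 6, 7] : List Int)) :
    PySem.List.pySetD (pvRender kind S) k "1" = pvRender kind (PySem.Set.add S (kind, k)) := by
  fin_cases hk <;>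
    simp [pvRender, pvBitS, PySem.List.pySetD, PySem.List.pySet?, PySem.List.pyIdx?,
      PySem.Set.mem_add, List.set]

lemma pv_render_other (S : PySem.Set (String × Int)) (kind kind' : String) (h : kind ≠ kind')
    (k : Int) : pvRender kind (PySem.Set.add S (kind', k)) = pvRender kind S := by
  simp [pvRender, pvBitS, PySem.Set.mem_add, h]

-- one step of A's inner loop = one step of B's grouping pass, seen through pvRender
lemma pv_step_eq (p : List String) (hp : PrePort_led_ptp p) (c : String)
    (hc : c ∈ (["c4", "c5", "c6", "c7"] : List String))
    (g : PySem.Dict String (PySem.Set (String × Int))) :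
    pvAStep c (pvRender "b" (g.getD c PySem.Set.empty), pvRender "d" (g.getD c PySem.Set.empty)) p =
      (pvRender "b" ((pvBStep g p).getD c PySem.Set.empty),
       pvRender "d" ((pvBStep g p).getD c PySem.Set.empty)) := by
  obtain ⟨-, hp2⟩ := hp
  rw [pvAStep, pvBStep]
  simp only [PySem.List.pyGetD_of_nonneg _ _ (by norm_num : (0:Int) ≤ 0),
    PySem.List.pyGetD_of_nonneg _ _ (by norm_num : (0:Int) ≤ 1), Int.toNat_one, Int.toNat_zero]
  by_cases hc1 : (p.getD 1 "") = c
  · obtain ⟨-, hbd⟩ := hp2 (hc1 ▸ hc)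
    by_cases hb : ((p.getD 0 "").toList.getD 0 ' ') = 'b'
    · obtain ⟨-, hdig⟩ := hbd (Or.inl hb)
      have hk := pv_digit_mem _ hdig
      rw [if_pos hc1, if_pos hb, hc1, hb]
      rw [if_pos (show ((["c4","c5","c6","c7"] : List String).contains c
            && (decide (('b':Char) = 'b') || decide (('b':Char) = 'd'))) = true by
          simp [hc])]
      rw [PySem.Dict.getD_insert, if_pos rfl]
      rw [show String.ofList ['b'] = "b" from rfl]
      rw [pv_render_set _ _ _ hk, pv_render_other _ "d" "b" (by decide) _]
    · by_cases hd : ((p.getD 0 "").toList.getD 0 ' ') = 'd'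
      · obtain ⟨-, hdig⟩ := hbd (Or.inr hd)
        have hk := pv_digit_mem _ hdig
        rw [if_pos hc1, if_neg hb, if_pos hd, hc1, hd]
        rw [if_pos (show ((["c4","c5","c6","c7"] : List String).contains c
              && (decide (('d':Char) = 'b') || decide (('d':Char) = 'd'))) = true by
            simp [hc])]
        rw [PySem.Dict.getD_insert, if_pos rfl]
        rw [show String.ofList ['d'] = "d" from rfl]
        rw [pv_render_set _ _ _ hk, pv_render_other _ "b" "d" (by decide) _]
      · rw [if_pos hc1, if_neg hb, if_neg hd]
        rw [if_neg (show ¬ ((["c4","c5","c6","c7"] : List String).contains (p.getD 1 "")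
              && (decide (((p.getD 0 "").toList.getD 0 ' ') = 'b')
                || decide (((p.getD 0 "").toList.getD 0 ' ') = 'd'))) = true by
            simp only [Bool.and_eq_true, Bool.or_eq_true, decide_eq_true_eq, not_and, not_or]
            exact fun _ => ⟨hb, hd⟩)]
  · rw [if_neg hc1]
    by_cases hin : ((["c4","c5","c6","c7"] : List String).contains (p.getD 1 "")
        && (decide (((p.getD 0 "").toList.getD 0 ' ') = 'b')
          || decide (((p.getD 0 "").toList.getD 0 ' ') = 'd'))) = true
    · rw [if_pos hin, PySem.Dict.getD_insert, if_neg (fun h => hc1 h.symm)]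
    · rw [if_neg hin]

lemma pv_fold_eq (ports : List (List String)) (hpre : ∀ p ∈ ports, PrePort_led_ptp p)
    (c : String) (hc : c ∈ (["c4", "c5", "c6", "c7"] : List String))
    (g : PySem.Dict String (PySem.Set (String × Int))) :
    ports.foldl (pvAStep c)
        (pvRender "b" (g.getD c PySem.Set.empty), pvRender "d" (g.getD c PySem.Set.empty)) =
      (pvRender "b" ((ports.foldl pvBStep g).getD c PySem.Set.empty),
       pvRender "d" ((ports.foldl pvBStep g).getD c PySem.Set.empty)) := by
  induction ports generalizing g with
  | nil => rfl
  | cons p rest ih =>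
    simp only [List.foldl_cons]
    rw [pv_step_eq p (hpre p (by simp)) c hc g]
    exact ih (fun q hq => hpre q (by simp [hq])) (pvBStep g p)

lemma pv_shape_fold (ports : List (List String)) (hpre : ∀ p ∈ ports, PrePort_led_ptp p)
    (c : String) (g : PySem.Dict String (PySem.Set (String × Int)))
    (hg : ∀ x ∈ g.getD c PySem.Set.empty, pvShape x) :
    ∀ x ∈ (ports.foldl pvBStep g).getD c PySem.Set.empty, pvShape x := by
  induction ports generalizing g with
  | nil => exact hg
  | cons p rest ih =>
    refine ih (fun q hq => hpre q (by simp [hq])) (pvBStep g p) ?_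
    obtain ⟨-, hp2⟩ := hpre p (by simp)
    rw [pvBStep]
    simp only [PySem.List.pyGetD_of_nonneg _ _ (by norm_num : (0:Int) ≤ 0),
      PySem.List.pyGetD_of_nonneg _ _ (by norm_num : (0:Int) ≤ 1), Int.toNat_one, Int.toNat_zero]
    split
    · rename_i hcond
      simp only [List.contains_eq_mem, Bool.and_eq_true, decide_eq_true_eq, Bool.or_eq_true] at hcond
      obtain ⟨hcs, hbd⟩ := hcond
      obtain ⟨-, hdig⟩ := hp2 hcs
      rw [PySem.Dict.getD_insert]
      split
      · rename_i hceq
        intro x hx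
        rw [PySem.Set.mem_add] at hx
        rcases hx with hx | hx
        · exact hg x (hceq ▸ hx)
        · subst hx
          obtain ⟨-, hd2⟩ := hdig (by simpa using hbd)
          constructor
          · rcases hbd with h | h
            · rw [h]; exact Or.inl (show String.ofList ['b'] = "b" by decide)
            · rw [h]; exact Or.inr (show String.ofList ['d'] = "d" by decide)
          · simpa using pv_digit_mem _ hd2
      · exact hg
    · exact hg

def pvBitsRev (kind : String) (S : PySem.Set (String × Int)) : List Char :=
  [pvBit S kind 7, pvBit S kind 6, pvBit S kind 5, pvBit S kind 4,
   pvBit S kind 3, pvBit S kind 2, pvBit S kind 1, pvBit S kind 0]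

lemma pv_rev_join (kind : String) (S : PySem.Set (String × Int)) :
    ((pvRender kind S).reverse.map String.toList).flatten = pvBitsRev kind S := by
  simp only [pvRender, pvBitsRev, pvBit, pvBitS, List.reverse_cons, List.reverse_nil,
    List.nil_append, List.cons_append, List.map, List.flatten, apply_ite String.toList]
  split_ifs <;> rfl

lemma pv_bbits_eq (S : PySem.Set (String × Int)) (kind : String) :
    (PySem.List.pyRange 0 8 1).map (fun j => pvBit S kind (7 - j)) = pvBitsRev kind S := by
  rw [(by decide : PySem.List.pyRange 0 8 1 = [0,1,2,3,4,5,6,7])]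
  simp only [List.map, pvBitsRev]
  norm_num

lemma pv_pause_iff (S : PySem.Set (String × Int)) (hS : ∀ x ∈ S, pvShape x) :
    (pvBitsRev "b" S ++ pvBitsRev "d" S = "0000000000000000".toList) ↔ S = [] := by
  constructor
  · intro h
    rcases S with _ | ⟨⟨kind, j⟩, rest⟩
    · rfl
    · exfalso
      obtain ⟨hkind, hj⟩ := hS (kind, j) (by simp)
      replace hkind : kind = "b" ∨ kind = "d" := hkind
      replace hj : j ∈ ([0, 1, 2, 3, 4, 5, 6, 7] : List Int) := hj
      have hj' : j = 0 ∨ j = 1 ∨ j = 2 ∨ j = 3 ∨ j = 4 ∨ j = 5 ∨ j = 6 ∨ j = 7 := by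
        simpa using hj
      rcases hkind with hk | hk <;> subst hk <;>
        rcases hj' with h' | h' | h' | h' | h' | h' | h' | h' <;> subst h' <;>
        · simp [pvBitsRev, pvBit, PySem.Set.contains] at h
  · intro h; subst h; decide

lemma pv_frame_eq (ports : List (List String)) (hpre : ∀ p ∈ ports, PrePort_led_ptp p)
    (ci : Int) (c : String)
    (hc : (ci, c) ∈ ([(0, "c4"), (1, "c5"), (2, "c6"), (3, "c7")] : List (Int × String))) :
    pvAFrame ports c = pvBFrame ci c (ports.foldl pvBStep PySem.Dict.empty) := by
  have hcs : c ∈ (["c4", "c5", "c6", "c7"] : List String) := by fin_cases hc <;> decide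
  have hshape := pv_shape_fold ports hpre c PySem.Dict.empty (by simp [PySem.Dict.getD_empty, PySem.Set.empty])
  rw [pvAFrame, pvBFrame]
  rw [show (pvZeros, pvZeros) = (pvRender "b" (PySem.Dict.empty.getD c PySem.Set.empty),
        pvRender "d" (PySem.Dict.empty.getD c PySem.Set.empty)) from rfl]
  rw [pv_fold_eq ports hpre c hcs PySem.Dict.empty]
  set S := ((ports.foldl pvBStep PySem.Dict.empty).getD c PySem.Set.empty) with hSdef
  simp only [pv_rev_join, pv_bbits_eq]
  by_cases hemp : S = []
  · rw [if_pos ((pv_pause_iff S hshape).mpr hemp), if_pos (by simp [hemp])]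
  · rw [if_neg (fun h => hemp ((pv_pause_iff S hshape).mp h)),
      if_neg (by simpa [List.isEmpty_iff] using hemp)]
    have hcbits : ((PySem.List.pySetD pvZeros (pvDigitInt (PySem.List.pyGetD c.toList 1 ' ')) "1").reverse.map
          String.toList).flatten = (PySem.List.pyRange 0 8 1).map (fun j => if 7 - j = ci + 4 then '1' else '0') := by
      fin_cases hc <;> decide
    rw [hcbits]

-- ===== VERDICT (by name: the statement is the Claim_ definition above) =====
theorem led_ptp_spec : Claim_equal_led_ptp := by
  intro ports _hdom hpre
  unfold Spec_led_ptp led_ptp led_ptp_alt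
  simp only [PySem.List.enumerate, List.foldl]
  rw [pv_frame_eq ports hpre 0 "c4" (by decide), pv_frame_eq ports hpre 1 "c5" (by decide),
      pv_frame_eq ports hpre 2 "c6" (by decide), pv_frame_eq ports hpre 3 "c7" (by decide)]
  norm_num
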